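-- pv_equiv track=rewrite | github.com/tjlee1214/nam | Numenta/nab/scorer.py | compute_anomaly_windows
-- ===== SOURCE A (Python) =====
-- def compute_anomaly_windows(anomaly_flag):
--   anomaly_windows = []
--   startIndex = -1
--   endIndex = -1
--   for i in range(len(anomaly_flag)):
--     if anomaly_flag[i] == 1:
--       if startIndex==-1:
--         startIndex = i
--         endIndex = i
--       elif endIndex+1 != i:
--         anomaly_windows.append([startIndex,endIndex])
--         startIndex = i
--         endIndex = i
--       else:
--         endIndex = i
--
--   if startIndex!=-1 and (len(anomaly_windows)==0 or anomaly_windows[len(anomaly_windows)-1][0]!=startIndex):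
--     anomaly_windows.append([startIndex, endIndex])
--
--   return anomaly_windows
-- ===== SOURCE B (Python) =====
-- def compute_anomaly_windows(anomaly_flag):
--     # Classic index-minus-rank grouping: an index i that is the rank-th flagged
--     # position gets key i - rank; consecutive flagged indices share a key, so
--     # each dict entry collects exactly one maximal run of 1s.
--     ones = [i for i, v in enumerate(anomaly_flag) if v == 1]
--     groups = {}
--     for rank, idx in enumerate(ones):
--         key = idx - rank
--         groups[key] = groups.get(key, []) + [idx]
--     return [[g[0], g[-1]] for g in groups.values()]
-- ===== Notes on version B (the rewrite author's own statement) =====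
-- stated objective: alternative
-- what changed: Replaced A's single stateful scan (pending startIndex/endIndex flushed on gaps and after the loop with a duplicate-append guard) by the classic index-minus-rank grouping: collect the flagged indices, bucket them in a dict keyed by idx - rank (consecutive flagged indices share a key, so each bucket is one maximal run), then emit [first, last] of each bucket.
import Mathlib
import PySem

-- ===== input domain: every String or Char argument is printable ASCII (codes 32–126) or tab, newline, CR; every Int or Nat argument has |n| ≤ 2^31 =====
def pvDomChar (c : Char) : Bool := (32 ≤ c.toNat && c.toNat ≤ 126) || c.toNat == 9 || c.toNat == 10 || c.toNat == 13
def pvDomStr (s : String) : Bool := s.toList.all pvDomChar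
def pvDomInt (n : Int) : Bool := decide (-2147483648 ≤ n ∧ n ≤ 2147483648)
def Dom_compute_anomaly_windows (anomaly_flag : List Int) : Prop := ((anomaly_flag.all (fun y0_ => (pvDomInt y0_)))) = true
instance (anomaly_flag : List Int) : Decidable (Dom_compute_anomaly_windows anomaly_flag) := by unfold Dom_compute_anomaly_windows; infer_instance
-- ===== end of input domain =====

-- B replaces A's stateful pending-run scan (flushed on gaps / after the loop with a duplicate
-- guard) by index-minus-rank grouping of the flagged indices into a dict; objective: alternative.


-- ===== PORT A =====
-- the for-loop over range(len(anomaly_flag)) with anomaly_flag[i]: structural recursion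
-- over the list carrying the index i and the state (anomaly_windows, startIndex, endIndex)
def pvALoop (l : List Int) (i : Int) (st : List (List Int) × Int × Int) :
    List (List Int) × Int × Int :=
  match l with
  | [] => st
  | x :: rest =>
    let acc := st.1
    let s := st.2.1
    let e := st.2.2
    let st' :=
      if x = 1 then
        if s = -1 then (acc, i, i)
        else if e + 1 ≠ i then (acc ++ [[s, e]], i, i)
        else (acc, s, i)
      else st
    pvALoop rest (i + 1) st'

def compute_anomaly_windows (anomaly_flag : List Int) : List (List Int) :=
  let st := pvALoop anomaly_flag 0 ([], -1, -1)
  let acc := st.1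
  let s := st.2.1
  let e := st.2.2
  -- anomaly_windows[len(anomaly_windows)-1][0] — in-range access, rendered with getD
  if s ≠ -1 ∧ (acc.length = 0 ∨ (acc.getD (acc.length - 1) []).getD 0 0 ≠ s) then
    acc ++ [[s, e]]
  else acc

-- ===== PORT B =====
-- g[0] / g[-1] of a group
def pvWin (g : List Int) : List Int :=
  [PySem.List.pyGetD g 0 0, PySem.List.pyGetD g (-1) 0]

-- ones = [i for i, v in enumerate(anomaly_flag) if v == 1]
-- groups[key] = groups.get(key, []) + [idx]  for rank, idx in enumerate(ones)
-- return [[g[0], g[-1]] for g in groups.values()]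
def compute_anomaly_windows_alt (anomaly_flag : List Int) : List (List Int) :=
  (((PySem.List.enumerate
        (((PySem.List.enumerate anomaly_flag 0).filter (fun p => p.2 == 1)).map (fun p => p.1))
        0).foldl
      (fun d p => d.insert (p.2 - p.1) (d.getD (p.2 - p.1) [] ++ [p.2]))
      PySem.Dict.empty).values).map pvWin

-- ===== PRECONDITION & SPEC =====
def Spec_compute_anomaly_windows (anomaly_flag : List Int) (out : List (List Int)) : Prop := out = compute_anomaly_windows_alt anomaly_flag
instance (anomaly_flag : List Int) (out : List (List Int)) : Decidable (Spec_compute_anomaly_windows anomaly_flag out) := by unfold Spec_compute_anomaly_windows; infer_instance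

-- ===== CLAIM (what is proved, stated in full; the proofs are below) =====
def Claim_equal_compute_anomaly_windows : Prop := ∀ (anomaly_flag : List Int), Dom_compute_anomaly_windows anomaly_flag → Spec_compute_anomaly_windows anomaly_flag (compute_anomaly_windows anomaly_flag)

-- ===== LEMMAS AND PROOFS =====

-- the indices (from offset i) of the elements equal to 1
def pvOnes (l : List Int) (i : Int) : List Int :=
  match l with
  | [] => []
  | x :: rest => if x = 1 then i :: pvOnes rest (i + 1) else pvOnes rest (i + 1)

theorem pvOnes_eq (l : List Int) : ∀ i : Int,
    ((PySem.List.enumerate l i).filter (fun p => p.2 == 1)).map (fun p => p.1) = pvOnes l i := by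
  induction l with
  | nil => intro i; rfl
  | cons x rest ih =>
    intro i
    simp only [PySem.List.enumerate_cons, List.filter_cons, pvOnes]
    by_cases hx : x = 1
    · simp [hx, ih]
    · simp [hx, ih]

theorem pvOnes_bounds (l : List Int) : ∀ i : Int,
    (∀ x ∈ pvOnes l i, i ≤ x) ∧ (pvOnes l i).Pairwise (· < ·) := by
  induction l with
  | nil =>
    intro i
    refine ⟨?_, List.Pairwise.nil⟩
    intro x hx
    cases hx
  | cons y rest ih =>
    intro i
    obtain ⟨hmem, hpw⟩ := ih (i + 1)
    unfold pvOnes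
    by_cases hy : y = 1
    · rw [if_pos hy]
      refine ⟨?_, ?_⟩
      · intro x hx
        rcases List.mem_cons.mp hx with h | h
        · omega
        · have := hmem x h; omega
      · exact List.Pairwise.cons (fun x hx => by have := hmem x hx; omega) hpw
    · rw [if_neg hy]
      exact ⟨fun x hx => by have := hmem x hx; omega, hpw⟩

-- A's loop body at a flagged index
def pvAStep (st : List (List Int) × Int × Int) (i : Int) : List (List Int) × Int × Int :=
  if st.2.1 = -1 then (st.1, i, i)
  else if st.2.2 + 1 ≠ i then (st.1 ++ [[st.2.1, st.2.2]], i, i)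
  else (st.1, st.2.1, i)

theorem pvALoop_eq_foldl (l : List Int) : ∀ (i : Int) (st : List (List Int) × Int × Int),
    pvALoop l i st = (pvOnes l i).foldl pvAStep st := by
  induction l with
  | nil => intro i st; rfl
  | cons x rest ih =>
    intro i st
    simp only [pvALoop, pvOnes]
    by_cases hx : x = 1
    · rw [if_pos hx, if_pos hx]
      simp only [List.foldl_cons]
      rw [ih]
      rfl
    · rw [if_neg hx, if_neg hx]
      exact ih (i + 1) st

-- B's grouping step carrying the rank explicitly
def pvBStep (dr : PySem.Dict Int (List Int) × Int) (idx : Int) :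
    PySem.Dict Int (List Int) × Int :=
  (dr.1.insert (idx - dr.2) (dr.1.getD (idx - dr.2) [] ++ [idx]), dr.2 + 1)

theorem pvB_fusion (xs : List Int) : ∀ (r : Int) (d : PySem.Dict Int (List Int)),
    (PySem.List.enumerate xs r).foldl
      (fun d p => d.insert (p.2 - p.1) (d.getD (p.2 - p.1) [] ++ [p.2])) d
    = (xs.foldl pvBStep (d, r)).1 := by
  induction xs with
  | nil => intro r d; rfl
  | cons x rest ih =>
    intro r d
    simp only [PySem.List.enumerate_cons, List.foldl_cons]
    exact ih (r + 1) _

-- A's post-loop finalisation, as a function of the loop state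
def pvAFin (st : List (List Int) × Int × Int) : List (List Int) :=
  if st.2.1 ≠ -1 ∧ (st.1.length = 0 ∨ (st.1.getD (st.1.length - 1) []).getD 0 0 ≠ st.2.1) then
    st.1 ++ [[st.2.1, st.2.2]]
  else st.1

-- A's duplicate-append guard
def pvG (acc : List (List Int)) (s : Int) : Prop :=
  acc.length = 0 ∨ (acc.getD (acc.length - 1) []).getD 0 0 ≠ s

theorem pvG_append (acc : List (List Int)) (s e i : Int) (h : s ≠ i) :
    pvG (acc ++ [[s, e]]) i := by
  unfold pvG
  right
  have hlen : (acc ++ [[s, e]]).length - 1 = acc.length := by simp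
  rw [hlen]
  have : (acc ++ [[s, e]]).getD acc.length [] = [s, e] := by
    simp [List.getD]
  rw [this]
  simpa using h

theorem pvWin_singleton (x : Int) : pvWin [x] = [x, x] := by
  simp [pvWin, PySem.List.pyGetD_zero_cons, PySem.List.pyGetD_neg_one ([x]) 0 (by simp)]

theorem pvWin_append (g : List Int) (hg : g ≠ []) (x : Int) :
    pvWin (g ++ [x]) = [PySem.List.pyGetD g 0 0, x] := by
  unfold pvWin
  rw [PySem.List.pyGetD_neg_one_append_singleton]
  congr 1
  cases g with
  | nil => exact absurd rfl hg
  | cons a t => simp [PySem.List.pyGetD_zero_cons]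

-- the main invariant-carrying induction over the list of flagged indices
theorem pvMain (xs : List Int) :
    ∀ (acc : List (List Int)) (s e r : Int) (d : PySem.Dict Int (List Int))
      (init : List (Int × List Int)) (g : List Int),
    xs.Pairwise (· < ·) → (∀ x ∈ xs, e < x) →
    0 ≤ s → s ≤ e →
    d.items = init ++ [(e + 1 - r, g)] →
    (d.items.map (·.1)).Pairwise (· < ·) →
    init.map (fun p => pvWin p.2) = acc →
    g ≠ [] → pvWin g = [s, e] →
    pvG acc s →
    pvAFin (xs.foldl pvAStep (acc, s, e)) = ((xs.foldl pvBStep (d, r)).1.values).map pvWin := by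
  induction xs with
  | nil =>
    intro acc s e r d init g _ _ hs hse hitems _ hacc hgne hwin hG
    simp only [List.foldl_nil, pvAFin]
    rw [if_pos ⟨by omega, hG⟩]
    have : d.values = init.map (·.2) ++ [g] := by
      simp [PySem.Dict.values, hitems]
    rw [this]
    simp only [List.map_append, List.map_cons, List.map_nil, hwin]
    rw [← hacc]
    simp [Function.comp]
  | cons x rest ih =>
    intro acc s e r d init g hpw hgt hs hse hitems hkeys hacc hgne hwin hG
    have hex : e < x := hgt x (List.mem_cons_self)
    have hpwrest : rest.Pairwise (· < ·) := hpw.of_cons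
    have hxrest : ∀ y ∈ rest, x < y := fun y hy => List.rel_of_pairwise_cons hpw hy
    have hkeysnd : d.keys.Nodup := by
      have h := hkeys.imp (fun {a b} (h : a < b) => ne_of_lt h)
      simpa [PySem.Dict.keys, List.Nodup] using h
    simp only [List.foldl_cons]
    by_cases hcase : x = e + 1
    · -- run continues: same key e + 1 - r, group extended in place
      have hstep : pvAStep (acc, s, e) x = (acc, s, x) := by
        unfold pvAStep
        simp only []
        rw [if_neg (by omega : ¬ (s = -1)), if_neg (by omega : ¬ (e + 1 ≠ x))]
      have hkeyeq : x - r = e + 1 - r := by omega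
      have hmemlast : (e + 1 - r, g) ∈ d.items := by rw [hitems]; simp
      have hgetD : d.getD (e + 1 - r) [] = g :=
        PySem.Dict.getD_of_mem_items d hmemlast hkeysnd []
      have hcont : d.contains (e + 1 - r) = true := by
        rw [PySem.Dict.contains_iff_mem_keys]
        simp [PySem.Dict.keys, hitems]
      have hinitlt : ∀ p ∈ init, p.1 < e + 1 - r := by
        intro p hp
        have h := hkeys
        rw [hitems, List.map_append] at h
        have h2 := (List.pairwise_append.mp h).2.2
        exact h2 p.1 (List.mem_map_of_mem hp) (e + 1 - r) (by simp)
      have hitems' : (d.insert (e + 1 - r) (g ++ [x])).items = init ++ [(e + 1 - r, g ++ [x])] := by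
        rw [PySem.Dict.items_insert_of_contains d (g ++ [x]) hcont, hitems]
        rw [List.map_append]
        congr 1
        · calc init.map (fun p => if (p.1 == e + 1 - r) = true then (e + 1 - r, g ++ [x]) else p)
              = init.map id := by
                apply List.map_congr_left
                intro p hp
                simp only [id]
                rw [if_neg (by simp; exact ne_of_lt (hinitlt p hp))]
          _ = init := List.map_id init
        · simp
      have hkeys' : ((d.insert (e + 1 - r) (g ++ [x])).items.map (·.1)).Pairwise (· < ·) := by
        have : (d.insert (e + 1 - r) (g ++ [x])).items.map (·.1) = d.items.map (·.1) := by
          rw [hitems', hitems]; simp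
        rw [this]; exact hkeys
      have hbstep : pvBStep (d, r) x = (d.insert (e + 1 - r) (g ++ [x]), r + 1) := by
        unfold pvBStep
        simp only [hkeyeq, hgetD]
      rw [hstep, hbstep]
      have := ih acc s x (r + 1) (d.insert (e + 1 - r) (g ++ [x])) init (g ++ [x])
        hpwrest hxrest hs (by omega)
        (by rw [hitems']; congr 3; omega)
        hkeys' hacc (by simp)
        (by rw [pvWin_append g hgne x]
            have : PySem.List.pyGetD g 0 0 = s := by
              have := hwin; unfold pvWin at this
              exact (List.cons.injEq _ _ _ _ ▸ this).1
            rw [this])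
        hG
      exact this
    · -- gap: A flushes [s,e]; B opens a fresh key x - r
      have hstep : pvAStep (acc, s, e) x = (acc ++ [[s, e]], x, x) := by
        unfold pvAStep
        simp only []
        rw [if_neg (by omega : ¬ (s = -1)), if_pos (by omega : e + 1 ≠ x)]
      have hkeylt : ∀ k ∈ d.items.map (·.1), k < x - r := by
        intro k hk
        have h := hkeys
        rw [hitems, List.map_append] at h
        rw [hitems, List.map_append] at hk
        rcases List.mem_append.mp hk with hmem1 | hmem1
        · have h2 := (List.pairwise_append.mp h).2.2
          have := h2 k hmem1 (e + 1 - r) (by simp)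
          omega
        · simp at hmem1; omega
      have hncont : d.contains (x - r) = false := by
        by_contra hc
        have : d.contains (x - r) = true := by
          cases h : d.contains (x - r)
          · exact absurd h hc
          · rfl
        rw [PySem.Dict.contains_iff_mem_keys] at this
        have hk := hkeylt (x - r) this
        omega
      have hgetD : d.getD (x - r) [] = [] := PySem.Dict.getD_of_not_contains d [] hncont
      have hitems' : (d.insert (x - r) [x]).items = d.items ++ [(x - r, [x])] :=
        PySem.Dict.items_insert_of_not_contains d [x] hncont
      have hbstep : pvBStep (d, r) x = (d.insert (x - r) [x], r + 1) := by
        unfold pvBStep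
        simp only [hgetD, List.nil_append]
      rw [hstep, hbstep]
      have hkeys' : ((d.insert (x - r) [x]).items.map (·.1)).Pairwise (· < ·) := by
        rw [hitems', List.map_append]
        rw [List.pairwise_append]
        refine ⟨hkeys, by simp, ?_⟩
        intro a ha b hb
        simp at hb
        rw [hb]
        exact hkeylt a ha
      have := ih (acc ++ [[s, e]]) x x (r + 1) (d.insert (x - r) [x])
        (init ++ [(e + 1 - r, g)]) [x]
        hpwrest hxrest (by omega) le_rfl
        (by rw [hitems', hitems]; congr 3; omega)
        hkeys'
        (by rw [List.map_append, hacc]; simp [hwin])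
        (by simp) (pvWin_singleton x)
        (pvG_append acc s e x (by omega))
      exact this

-- ===== VERDICT (by name: the statement is the Claim_ definition above) =====
theorem compute_anomaly_windows_spec : Claim_equal_compute_anomaly_windows := by
  intro l _
  unfold Spec_compute_anomaly_windows compute_anomaly_windows_alt
  show pvAFin (pvALoop l 0 ([], -1, -1)) = _
  rw [pvOnes_eq l 0, pvB_fusion, pvALoop_eq_foldl]
  obtain ⟨hmem, hpw⟩ := pvOnes_bounds l 0
  cases hxs : pvOnes l 0 with
  | nil =>
    simp [pvAFin, PySem.Dict.values, PySem.Dict.empty]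
  | cons x xs =>
    simp only [List.foldl_cons]
    have hx0 : 0 ≤ x := hmem x (by rw [hxs]; exact List.mem_cons_self)
    have hpw' : (x :: xs).Pairwise (· < ·) := hxs ▸ hpw
    have hastep : pvAStep ([], -1, -1) x = ([], x, x) := by
      unfold pvAStep; simp
    have hbstep : pvBStep (PySem.Dict.empty, 0) x = (PySem.Dict.empty.insert x [x], 1) := by
      unfold pvBStep
      simp [PySem.Dict.getD_empty]
    rw [hastep, hbstep]
    have hitems : (PySem.Dict.empty.insert x [x] : PySem.Dict Int (List Int)).items
        = [] ++ [(x + 1 - 1, [x])] := by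
      rw [PySem.Dict.items_insert_of_not_contains PySem.Dict.empty [x] (PySem.Dict.contains_empty x)]
      rw [(by omega : x + 1 - (1:Int) = x)]
      rfl
    have := pvMain xs [] x x 1 (PySem.Dict.empty.insert x [x]) [] [x]
      hpw'.of_cons (fun y hy => List.rel_of_pairwise_cons hpw' hy)
      hx0 le_rfl hitems
      (by rw [hitems]; simp)
      rfl (by simp) (pvWin_singleton x) (Or.inl rfl)
    exact this
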